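-- pv_equiv track=rewrite | github.com/KernicDE/ed-lore | scripts/delete_garbage_entities.py | is_garbage
-- ===== SOURCE A (Python) =====
-- GARBAGE_SUFFIXES = [
--     'gave', 'told', 'made', 'held', 'said', 'claimed', 'confirmed',
--     'argued', 'ordered', 'demanded', 'announced', 'revealed',
--     'provided', 'explained', 'added', 'continued', 'insisted',
--     'proposed', 'agreed', 'declared', 'stated', 'commented',
--     'warned', 'advised', 'noted', 'remarked', 'concluded',
--     'responded', 'replied', 'asked', 'questioned', 'suggested',
--     'emphasised', 'acknowledged', 'dismissed', 'criticised',
--     'praised', 'condemned', 'welcomed', 'rejected', 'accepted',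
--     'promised', 'threatened', 'offered', 'invited', 'urged',
--     'called', 'described', 'referred', 'considered', 'believed',
--     'expected', 'hoped', 'feared', 'reported',
--     'asserted', 'maintained', 'contended',
--     'observed', 'recalled', 'remembered', 'admitted',
--     'denied', 'recognised', 'understood',
--     'knew', 'learned', 'discovered', 'found', 'showed',
--     'demonstrated', 'proved', 'indicated',
--     'implied', 'summarised', 'outlined', 'detailed', 'listed',
-- ]
--
-- GARBAGE_EXACT = {
--     'the', 'with', 'but', 'and', 'for', 'from', 'that', 'this', 'these', 'those',
--     'when', 'where', 'what', 'who', 'why', 'how', 'which', 'whose', 'whom',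
--     'its', 'it', 'he', 'she', 'they', 'them', 'their', 'his', 'her', 'him',
--     'we', 'us', 'our', 'you', 'your', 'i', 'me', 'my', 'mine',
--     'a', 'an', 'all', 'any', 'both', 'each', 'either', 'neither', 'none',
--     'some', 'many', 'much', 'more', 'most', 'other', 'another', 'such',
--     'no', 'not', 'only', 'own', 'same', 'so', 'than', 'too', 'very',
--     'one', 'two', 'three', 'four', 'five', 'six', 'seven', 'eight', 'nine', 'ten',
--     'can', 'will', 'shall', 'may', 'might', 'must', 'should', 'would', 'could',
--     'do', 'does', 'did', 'done', 'doing', 'have', 'has', 'had', 'having',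
--     'be', 'been', 'being', 'am', 'is', 'are', 'was', 'were',
--     'go', 'goes', 'going', 'went', 'gone',
--     'get', 'gets', 'getting', 'got', 'gotten',
--     'take', 'takes', 'taking', 'took', 'taken',
--     'come', 'comes', 'coming', 'came',
--     'see', 'sees', 'seeing', 'saw', 'seen',
--     'know', 'knows', 'knowing', 'knew', 'known',
--     'think', 'thinks', 'thinking', 'thought',
--     'use', 'uses', 'using', 'used',
--     'find', 'finds', 'finding', 'found',
--     'give', 'gives', 'giving', 'given',
--     'tell', 'tells', 'telling', 'told',
--     'become', 'becomes', 'becoming', 'became',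
--     'leave', 'leaves', 'leaving', 'left',
--     'feel', 'feels', 'feeling', 'felt',
--     'put', 'puts', 'putting',
--     'bring', 'brings', 'bringing', 'brought',
--     'begin', 'begins', 'beginning', 'began', 'begun',
--     'keep', 'keeps', 'keeping', 'kept',
--     'hold', 'holds', 'holding',
--     'write', 'writes', 'writing', 'wrote', 'written',
--     'stand', 'stands', 'standing', 'stood',
--     'hear', 'hears', 'hearing', 'heard',
--     'let', 'lets', 'letting',
--     'mean', 'means', 'meaning', 'meant',
--     'set', 'sets', 'setting',
--     'meet', 'meets', 'meeting', 'met',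
--     'run', 'runs', 'running', 'ran',
--     'pay', 'pays', 'paying', 'paid',
--     'sit', 'sits', 'sitting', 'sat',
--     'speak', 'speaks', 'speaking', 'spoke', 'spoken',
--     'lie', 'lies', 'lying', 'lay', 'lain',
--     'lead', 'leads', 'leading', 'led',
--     'read', 'reads', 'reading',
--     'grow', 'grows', 'growing', 'grew', 'grown',
--     'lose', 'loses', 'losing', 'lost',
--     'fall', 'falls', 'falling', 'fell', 'fallen',
--     'send', 'sends', 'sending', 'sent',
--     'build', 'builds', 'building', 'built',
--     'understand', 'understands', 'understanding', 'understood',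
--     'draw', 'draws', 'drawing', 'drew', 'drawn',
--     'break', 'breaks', 'breaking', 'broke', 'broken',
--     'spend', 'spends', 'spending', 'spent',
--     'cut', 'cuts', 'cutting',
--     'rise', 'rises', 'rising', 'rose', 'risen',
--     'drive', 'drives', 'driving', 'drove', 'driven',
--     'buy', 'buys', 'buying', 'bought',
--     'wear', 'wears', 'wearing', 'wore', 'worn',
--     'choose', 'chooses', 'choosing', 'chose', 'chosen',
--     'seek', 'seeks', 'seeking', 'sought',
-- }
--
-- def is_garbage(entity_id):
--     eid = entity_id.lower().strip()
--     if eid in GARBAGE_EXACT: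
--         return True
--     for suffix in GARBAGE_SUFFIXES:
--         if eid.endswith('-' + suffix) or eid == suffix:
--             return True
--     for prefix in ['with-', 'but-', 'and-', 'for-', 'from-', 'that-', 'this-', 'these-', 'those-', 'when-', 'where-', 'what-', 'who-', 'why-', 'how-', 'which-', 'whose-', 'whom-', 'the-', 'a-', 'an-', 'as-', 'by-', 'on-', 'in-', 'at-', 'to-', 'of-', 'off-', 'up-', 'out-', 'down-', 'over-', 'under-', 'through-', 'during-', 'before-', 'after-', 'above-', 'below-', 'between-', 'among-', 'within-', 'without-', 'against-', 'toward-', 'towards-', 'across-', 'around-', 'behind-', 'beyond-', 'except-', 'inside-', 'into-', 'near-', 'onto-', 'outside-', 'upon-', 'via-', 'worth-']: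
--         if eid.startswith(prefix):
--             return True
--     for frag in ['the-following', 'following-the', 'news-is', 'is-coming', 'reports-from', 'sources-close', 'close-to', 'according-to', 'spokesperson-for', 'representative-of', 'officials-in', 'authorities-in', 'forces-in', 'fleet-in', 'station-in', 'system-in']:
--         if frag in eid:
--             return True
--     return False
-- ===== SOURCE B (Python) =====
-- # Garbage classifier: token extraction + set membership instead of list scans.
-- GARBAGE_EXACT = frozenset(
--     "the with but and for from that this these those when where what who why how which whose whom its it he she they them their his her him we us our you your i me my mine a an all any both each either neither none some many much more most other another such no not only own same so than too very one two three four five six seven eight nine ten can will shall may might must should would could do does did done doing have has had having be been being am is are was were go goes going went gone get gets getting got gotten take takes taking took taken come comes coming came see sees seeing saw seen know knows knowing knew known think thinks thinking thought use uses using used find finds finding found give gives giving given tell tells telling told become becomes becoming became leave leaves leaving left feel feels feeling felt put puts putting bring brings bringing brought begin begins beginning began begun keep keeps keeping kept hold holds holding write writes writing wrote written stand stands standing stood hear hears hearing heard let lets letting mean means meaning meant set sets setting meet meets meeting met run runs running ran pay pays paying paid sit sits sitting sat speak speaks speaking spoke spoken lie lies lying lay lain lead leads leading led read reads reading grow grows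 growing grew grown lose loses losing lost fall falls falling fell fallen send sends sending sent build builds building built understand understands understanding understood draw draws drawing drew drawn break breaks breaking broke broken spend spends spending spent cut cuts cutting rise rises rising rose risen drive drives driving drove driven buy buys buying bought wear wears wearing wore worn choose chooses choosing chose chosen seek seeks seeking sought".split())
--
-- SUFFIX_SET = frozenset(
--     "gave told made held said claimed confirmed argued ordered demanded announced revealed provided explained added continued insisted proposed agreed declared stated commented warned advised noted remarked concluded responded replied asked questioned suggested emphasised acknowledged dismissed criticised praised condemned welcomed rejected accepted promised threatened offered invited urged called described referred considered believed expected hoped feared reported asserted maintained contended observed recalled remembered admitted denied recognised understood knew learned discovered found showed demonstrated proved indicated implied summarised outlined detailed listed".split())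
--
-- PREFIX_WORDS = frozenset(
--     "with but and for from that this these those when where what who why how which whose whom the a an as by on in at to of off up out down over under through during before after above below between among within without against toward towards across around behind beyond except inside into near onto outside upon via worth".split())
--
-- FRAGMENTS = ("the-following following-the news-is is-coming reports-from sources-close close-to according-to spokesperson-for representative-of officials-in authorities-in forces-in fleet-in station-in system-in").split()
--
--
-- def is_garbage(entity_id):
--     eid = entity_id.lower().strip()
--     if eid in GARBAGE_EXACT:
--         return True
--     # last dash-separated token covers both eid == suffix and eid.endswith('-' + suffix)
--     if eid.rsplit('-', 1)[-1] in SUFFIX_SET: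
--         return True
--     # first token matters only when a dash is actually present
--     if '-' in eid and eid.split('-', 1)[0] in PREFIX_WORDS:
--         return True
--     return any(frag in eid for frag in FRAGMENTS)
-- ===== Notes on version B (the rewrite author's own statement) =====
-- stated objective: idiomatic
-- what changed: Instead of scanning the 78-entry suffix list with endswith/equality and the 60-entry prefix list with startswith, B extracts the final dash-separated token (rsplit) and the first token (split) once and looks each up in a frozenset, with all word tables built by splitting one string literal; the exact-set check and the fragment substring check are unchanged.
import Mathlib
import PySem

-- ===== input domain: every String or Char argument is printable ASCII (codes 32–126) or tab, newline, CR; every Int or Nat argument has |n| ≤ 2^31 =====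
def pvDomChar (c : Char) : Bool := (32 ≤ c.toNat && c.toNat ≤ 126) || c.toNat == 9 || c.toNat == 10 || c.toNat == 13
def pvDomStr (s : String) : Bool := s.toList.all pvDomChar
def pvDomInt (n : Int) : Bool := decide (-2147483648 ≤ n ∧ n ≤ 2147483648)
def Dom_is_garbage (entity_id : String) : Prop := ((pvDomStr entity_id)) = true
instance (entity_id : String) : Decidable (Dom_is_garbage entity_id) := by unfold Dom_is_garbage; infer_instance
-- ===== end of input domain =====

set_option maxRecDepth 100000

-- B replaces A's two linear endswith/startswith scans by extracting the final/first dash token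
-- once and testing set membership, with each word table built by splitting one space-separated
-- string (objective: idiomatic; no speed claim).

-- ===== PORT A =====
def GARBAGE_SUFFIXES : List String := [
  "gave", "told", "made", "held", "said", "claimed", "confirmed", "argued", "ordered", "demanded",
  "announced", "revealed", "provided", "explained", "added", "continued", "insisted", "proposed",
  "agreed", "declared", "stated", "commented", "warned", "advised", "noted", "remarked",
  "concluded", "responded", "replied", "asked", "questioned", "suggested", "emphasised",
  "acknowledged", "dismissed", "criticised", "praised", "condemned", "welcomed", "rejected",
  "accepted", "promised", "threatened", "offered", "invited", "urged", "called", "described",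
  "referred", "considered", "believed", "expected", "hoped", "feared", "reported", "asserted",
  "maintained", "contended", "observed", "recalled", "remembered", "admitted", "denied",
  "recognised", "understood", "knew", "learned", "discovered", "found", "showed", "demonstrated",
  "proved", "indicated", "implied", "summarised", "outlined", "detailed", "listed"]

def GARBAGE_EXACT : PySem.Set String := PySem.Set.ofList [
  "the", "with", "but", "and", "for", "from", "that", "this", "these", "those", "when", "where",
  "what", "who", "why", "how", "which", "whose", "whom", "its", "it", "he", "she", "they", "them",
  "their", "his", "her", "him", "we", "us", "our", "you", "your", "i", "me", "my", "mine", "a",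
  "an", "all", "any", "both", "each", "either", "neither", "none", "some", "many", "much", "more",
  "most", "other", "another", "such", "no", "not", "only", "own", "same", "so", "than", "too",
  "very", "one", "two", "three", "four", "five", "six", "seven", "eight", "nine", "ten", "can",
  "will", "shall", "may", "might", "must", "should", "would", "could", "do", "does", "did",
  "done", "doing", "have", "has", "had", "having", "be", "been", "being", "am", "is", "are",
  "was", "were", "go", "goes", "going", "went", "gone", "get", "gets", "getting", "got", "gotten",
  "take", "takes", "taking", "took", "taken", "come", "comes", "coming", "came", "see", "sees",
  "seeing", "saw", "seen", "know", "knows", "knowing", "knew", "known", "think", "thinks",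
  "thinking", "thought", "use", "uses", "using", "used", "find", "finds", "finding", "found",
  "give", "gives", "giving", "given", "tell", "tells", "telling", "told", "become", "becomes",
  "becoming", "became", "leave", "leaves", "leaving", "left", "feel", "feels", "feeling", "felt",
  "put", "puts", "putting", "bring", "brings", "bringing", "brought", "begin", "begins",
  "beginning", "began", "begun", "keep", "keeps", "keeping", "kept", "hold", "holds", "holding",
  "write", "writes", "writing", "wrote", "written", "stand", "stands", "standing", "stood",
  "hear", "hears", "hearing", "heard", "let", "lets", "letting", "mean", "means", "meaning",
  "meant", "set", "sets", "setting", "meet", "meets", "meeting", "met", "run", "runs", "running",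
  "ran", "pay", "pays", "paying", "paid", "sit", "sits", "sitting", "sat", "speak", "speaks",
  "speaking", "spoke", "spoken", "lie", "lies", "lying", "lay", "lain", "lead", "leads",
  "leading", "led", "read", "reads", "reading", "grow", "grows", "growing", "grew", "grown",
  "lose", "loses", "losing", "lost", "fall", "falls", "falling", "fell", "fallen", "send",
  "sends", "sending", "sent", "build", "builds", "building", "built", "understand", "understands",
  "understanding", "understood", "draw", "draws", "drawing", "drew", "drawn", "break", "breaks",
  "breaking", "broke", "broken", "spend", "spends", "spending", "spent", "cut", "cuts", "cutting",
  "rise", "rises", "rising", "rose", "risen", "drive", "drives", "driving", "drove", "driven",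
  "buy", "buys", "buying", "bought", "wear", "wears", "wearing", "wore", "worn", "choose",
  "chooses", "choosing", "chose", "chosen", "seek", "seeks", "seeking", "sought"]

def A_PREFIXES : List String := [
  "with-", "but-", "and-", "for-", "from-", "that-", "this-", "these-", "those-", "when-",
  "where-", "what-", "who-", "why-", "how-", "which-", "whose-", "whom-", "the-", "a-", "an-",
  "as-", "by-", "on-", "in-", "at-", "to-", "of-", "off-", "up-", "out-", "down-", "over-",
  "under-", "through-", "during-", "before-", "after-", "above-", "below-", "between-", "among-",
  "within-", "without-", "against-", "toward-", "towards-", "across-", "around-", "behind-",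
  "beyond-", "except-", "inside-", "into-", "near-", "onto-", "outside-", "upon-", "via-",
  "worth-"]

def A_FRAGMENTS : List String := [
  "the-following", "following-the", "news-is", "is-coming", "reports-from", "sources-close",
  "close-to", "according-to", "spokesperson-for", "representative-of", "officials-in",
  "authorities-in", "forces-in", "fleet-in", "station-in", "system-in"]

def is_garbage (entity_id : String) : Bool :=
  let eid := PySem.Str.strip (PySem.Str.lower entity_id)
  if PySem.Set.contains GARBAGE_EXACT eid then true
  else if GARBAGE_SUFFIXES.any (fun suffix => PySem.Str.endswith eid ("-" ++ suffix) || eid == suffix) then true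
  else if A_PREFIXES.any (fun pre => PySem.Str.startswith eid pre) then true
  else if A_FRAGMENTS.any (fun frag => PySem.Str.isIn frag eid) then true
  else false

-- ===== PORT B =====
-- Source B builds each word table by splitting ONE space-separated string literal ("...".split()).
-- Strings are modelled at PySem's code-point level (List Char): each Source B string literal is
-- stored as its exact list of code points, and str.split() is ported by hand as the structural
-- splitter wordsC (exact for these space-separated ASCII literals: maximal space-free runs).
def wordsC : List Char → List Char → List (List Char)
  | [], acc => if acc.isEmpty then [] else [acc.reverse]
  | c :: rest, acc =>
    if c == ' ' then
      if acc.isEmpty then wordsC rest [] else acc.reverse :: wordsC rest []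
    else wordsC rest (c :: acc)

-- code points of the Source B literal backing GARBAGE_EXACT
def BIG_EXACT : List Char := [
  't', 'h', 'e', ' ', 'w', 'i', 't', 'h', ' ', 'b', 'u', 't', ' ', 'a', 'n', 'd', ' ', 'f', 'o', 'r', ' ', 'f', 'r', 'o',
  'm', ' ', 't', 'h', 'a', 't', ' ', 't', 'h', 'i', 's', ' ', 't', 'h', 'e', 's', 'e', ' ', 't', 'h', 'o', 's', 'e', ' ',
  'w', 'h', 'e', 'n', ' ', 'w', 'h', 'e', 'r', 'e', ' ', 'w', 'h', 'a', 't', ' ', 'w', 'h', 'o', ' ', 'w', 'h', 'y', ' ',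
  'h', 'o', 'w', ' ', 'w', 'h', 'i', 'c', 'h', ' ', 'w', 'h', 'o', 's', 'e', ' ', 'w', 'h', 'o', 'm', ' ', 'i', 't', 's',
  ' ', 'i', 't', ' ', 'h', 'e', ' ', 's', 'h', 'e', ' ', 't', 'h', 'e', 'y', ' ', 't', 'h', 'e', 'm', ' ', 't', 'h', 'e',
  'i', 'r', ' ', 'h', 'i', 's', ' ', 'h', 'e', 'r', ' ', 'h', 'i', 'm', ' ', 'w', 'e', ' ', 'u', 's', ' ', 'o', 'u', 'r',
  ' ', 'y', 'o', 'u', ' ', 'y', 'o', 'u', 'r', ' ', 'i', ' ', 'm', 'e', ' ', 'm', 'y', ' ', 'm', 'i', 'n', 'e', ' ', 'a',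
  ' ', 'a', 'n', ' ', 'a', 'l', 'l', ' ', 'a', 'n', 'y', ' ', 'b', 'o', 't', 'h', ' ', 'e', 'a', 'c', 'h', ' ', 'e', 'i',
  't', 'h', 'e', 'r', ' ', 'n', 'e', 'i', 't', 'h', 'e', 'r', ' ', 'n', 'o', 'n', 'e', ' ', 's', 'o', 'm', 'e', ' ', 'm',
  'a', 'n', 'y', ' ', 'm', 'u', 'c', 'h', ' ', 'm', 'o', 'r', 'e', ' ', 'm', 'o', 's', 't', ' ', 'o', 't', 'h', 'e', 'r',
  ' ', 'a', 'n', 'o', 't', 'h', 'e', 'r', ' ', 's', 'u', 'c', 'h', ' ', 'n', 'o', ' ', 'n', 'o', 't', ' ', 'o', 'n', 'l',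
  'y', ' ', 'o', 'w', 'n', ' ', 's', 'a', 'm', 'e', ' ', 's', 'o', ' ', 't', 'h', 'a', 'n', ' ', 't', 'o', 'o', ' ', 'v',
  'e', 'r', 'y', ' ', 'o', 'n', 'e', ' ', 't', 'w', 'o', ' ', 't', 'h', 'r', 'e', 'e', ' ', 'f', 'o', 'u', 'r', ' ', 'f',
  'i', 'v', 'e', ' ', 's', 'i', 'x', ' ', 's', 'e', 'v', 'e', 'n', ' ', 'e', 'i', 'g', 'h', 't', ' ', 'n', 'i', 'n', 'e',
  ' ', 't', 'e', 'n', ' ', 'c', 'a', 'n', ' ', 'w', 'i', 'l', 'l', ' ', 's', 'h', 'a', 'l', 'l', ' ', 'm', 'a', 'y', ' ',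
  'm', 'i', 'g', 'h', 't', ' ', 'm', 'u', 's', 't', ' ', 's', 'h', 'o', 'u', 'l', 'd', ' ', 'w', 'o', 'u', 'l', 'd', ' ',
  'c', 'o', 'u', 'l', 'd', ' ', 'd', 'o', ' ', 'd', 'o', 'e', 's', ' ', 'd', 'i', 'd', ' ', 'd', 'o', 'n', 'e', ' ', 'd',
  'o', 'i', 'n', 'g', ' ', 'h', 'a', 'v', 'e', ' ', 'h', 'a', 's', ' ', 'h', 'a', 'd', ' ', 'h', 'a', 'v', 'i', 'n', 'g',
  ' ', 'b', 'e', ' ', 'b', 'e', 'e', 'n', ' ', 'b', 'e', 'i', 'n', 'g', ' ', 'a', 'm', ' ', 'i', 's', ' ', 'a', 'r', 'e',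
  ' ', 'w', 'a', 's', ' ', 'w', 'e', 'r', 'e', ' ', 'g', 'o', ' ', 'g', 'o', 'e', 's', ' ', 'g', 'o', 'i', 'n', 'g', ' ',
  'w', 'e', 'n', 't', ' ', 'g', 'o', 'n', 'e', ' ', 'g', 'e', 't', ' ', 'g', 'e', 't', 's', ' ', 'g', 'e', 't', 't', 'i',
  'n', 'g', ' ', 'g', 'o', 't', ' ', 'g', 'o', 't', 't', 'e', 'n', ' ', 't', 'a', 'k', 'e', ' ', 't', 'a', 'k', 'e', 's',
  ' ', 't', 'a', 'k', 'i', 'n', 'g', ' ', 't', 'o', 'o', 'k', ' ', 't', 'a', 'k', 'e', 'n', ' ', 'c', 'o', 'm', 'e', ' ',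
  'c', 'o', 'm', 'e', 's', ' ', 'c', 'o', 'm', 'i', 'n', 'g', ' ', 'c', 'a', 'm', 'e', ' ', 's', 'e', 'e', ' ', 's', 'e',
  'e', 's', ' ', 's', 'e', 'e', 'i', 'n', 'g', ' ', 's', 'a', 'w', ' ', 's', 'e', 'e', 'n', ' ', 'k', 'n', 'o', 'w', ' ',
  'k', 'n', 'o', 'w', 's', ' ', 'k', 'n', 'o', 'w', 'i', 'n', 'g', ' ', 'k', 'n', 'e', 'w', ' ', 'k', 'n', 'o', 'w', 'n',
  ' ', 't', 'h', 'i', 'n', 'k', ' ', 't', 'h', 'i', 'n', 'k', 's', ' ', 't', 'h', 'i', 'n', 'k', 'i', 'n', 'g', ' ', 't',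
  'h', 'o', 'u', 'g', 'h', 't', ' ', 'u', 's', 'e', ' ', 'u', 's', 'e', 's', ' ', 'u', 's', 'i', 'n', 'g', ' ', 'u', 's',
  'e', 'd', ' ', 'f', 'i', 'n', 'd', ' ', 'f', 'i', 'n', 'd', 's', ' ', 'f', 'i', 'n', 'd', 'i', 'n', 'g', ' ', 'f', 'o',
  'u', 'n', 'd', ' ', 'g', 'i', 'v', 'e', ' ', 'g', 'i', 'v', 'e', 's', ' ', 'g', 'i', 'v', 'i', 'n', 'g', ' ', 'g', 'i',
  'v', 'e', 'n', ' ', 't', 'e', 'l', 'l', ' ', 't', 'e', 'l', 'l', 's', ' ', 't', 'e', 'l', 'l', 'i', 'n', 'g', ' ', 't',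
  'o', 'l', 'd', ' ', 'b', 'e', 'c', 'o', 'm', 'e', ' ', 'b', 'e', 'c', 'o', 'm', 'e', 's', ' ', 'b', 'e', 'c', 'o', 'm',
  'i', 'n', 'g', ' ', 'b', 'e', 'c', 'a', 'm', 'e', ' ', 'l', 'e', 'a', 'v', 'e', ' ', 'l', 'e', 'a', 'v', 'e', 's', ' ',
  'l', 'e', 'a', 'v', 'i', 'n', 'g', ' ', 'l', 'e', 'f', 't', ' ', 'f', 'e', 'e', 'l', ' ', 'f', 'e', 'e', 'l', 's', ' ',
  'f', 'e', 'e', 'l', 'i', 'n', 'g', ' ', 'f', 'e', 'l', 't', ' ', 'p', 'u', 't', ' ', 'p', 'u', 't', 's', ' ', 'p', 'u',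
  't', 't', 'i', 'n', 'g', ' ', 'b', 'r', 'i', 'n', 'g', ' ', 'b', 'r', 'i', 'n', 'g', 's', ' ', 'b', 'r', 'i', 'n', 'g',
  'i', 'n', 'g', ' ', 'b', 'r', 'o', 'u', 'g', 'h', 't', ' ', 'b', 'e', 'g', 'i', 'n', ' ', 'b', 'e', 'g', 'i', 'n', 's',
  ' ', 'b', 'e', 'g', 'i', 'n', 'n', 'i', 'n', 'g', ' ', 'b', 'e', 'g', 'a', 'n', ' ', 'b', 'e', 'g', 'u', 'n', ' ', 'k',
  'e', 'e', 'p', ' ', 'k', 'e', 'e', 'p', 's', ' ', 'k', 'e', 'e', 'p', 'i', 'n', 'g', ' ', 'k', 'e', 'p', 't', ' ', 'h',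
  'o', 'l', 'd', ' ', 'h', 'o', 'l', 'd', 's', ' ', 'h', 'o', 'l', 'd', 'i', 'n', 'g', ' ', 'w', 'r', 'i', 't', 'e', ' ',
  'w', 'r', 'i', 't', 'e', 's', ' ', 'w', 'r', 'i', 't', 'i', 'n', 'g', ' ', 'w', 'r', 'o', 't', 'e', ' ', 'w', 'r', 'i',
  't', 't', 'e', 'n', ' ', 's', 't', 'a', 'n', 'd', ' ', 's', 't', 'a', 'n', 'd', 's', ' ', 's', 't', 'a', 'n', 'd', 'i',
  'n', 'g', ' ', 's', 't', 'o', 'o', 'd', ' ', 'h', 'e', 'a', 'r', ' ', 'h', 'e', 'a', 'r', 's', ' ', 'h', 'e', 'a', 'r',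
  'i', 'n', 'g', ' ', 'h', 'e', 'a', 'r', 'd', ' ', 'l', 'e', 't', ' ', 'l', 'e', 't', 's', ' ', 'l', 'e', 't', 't', 'i',
  'n', 'g', ' ', 'm', 'e', 'a', 'n', ' ', 'm', 'e', 'a', 'n', 's', ' ', 'm', 'e', 'a', 'n', 'i', 'n', 'g', ' ', 'm', 'e',
  'a', 'n', 't', ' ', 's', 'e', 't', ' ', 's', 'e', 't', 's', ' ', 's', 'e', 't', 't', 'i', 'n', 'g', ' ', 'm', 'e', 'e',
  't', ' ', 'm', 'e', 'e', 't', 's', ' ', 'm', 'e', 'e', 't', 'i', 'n', 'g', ' ', 'm', 'e', 't', ' ', 'r', 'u', 'n', ' ',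
  'r', 'u', 'n', 's', ' ', 'r', 'u', 'n', 'n', 'i', 'n', 'g', ' ', 'r', 'a', 'n', ' ', 'p', 'a', 'y', ' ', 'p', 'a', 'y',
  's', ' ', 'p', 'a', 'y', 'i', 'n', 'g', ' ', 'p', 'a', 'i', 'd', ' ', 's', 'i', 't', ' ', 's', 'i', 't', 's', ' ', 's',
  'i', 't', 't', 'i', 'n', 'g', ' ', 's', 'a', 't', ' ', 's', 'p', 'e', 'a', 'k', ' ', 's', 'p', 'e', 'a', 'k', 's', ' ',
  's', 'p', 'e', 'a', 'k', 'i', 'n', 'g', ' ', 's', 'p', 'o', 'k', 'e', ' ', 's', 'p', 'o', 'k', 'e', 'n', ' ', 'l', 'i',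
  'e', ' ', 'l', 'i', 'e', 's', ' ', 'l', 'y', 'i', 'n', 'g', ' ', 'l', 'a', 'y', ' ', 'l', 'a', 'i', 'n', ' ', 'l', 'e',
  'a', 'd', ' ', 'l', 'e', 'a', 'd', 's', ' ', 'l', 'e', 'a', 'd', 'i', 'n', 'g', ' ', 'l', 'e', 'd', ' ', 'r', 'e', 'a',
  'd', ' ', 'r', 'e', 'a', 'd', 's', ' ', 'r', 'e', 'a', 'd', 'i', 'n', 'g', ' ', 'g', 'r', 'o', 'w', ' ', 'g', 'r', 'o',
  'w', 's', ' ', 'g', 'r', 'o', 'w', 'i', 'n', 'g', ' ', 'g', 'r', 'e', 'w', ' ', 'g', 'r', 'o', 'w', 'n', ' ', 'l', 'o',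
  's', 'e', ' ', 'l', 'o', 's', 'e', 's', ' ', 'l', 'o', 's', 'i', 'n', 'g', ' ', 'l', 'o', 's', 't', ' ', 'f', 'a', 'l',
  'l', ' ', 'f', 'a', 'l', 'l', 's', ' ', 'f', 'a', 'l', 'l', 'i', 'n', 'g', ' ', 'f', 'e', 'l', 'l', ' ', 'f', 'a', 'l',
  'l', 'e', 'n', ' ', 's', 'e', 'n', 'd', ' ', 's', 'e', 'n', 'd', 's', ' ', 's', 'e', 'n', 'd', 'i', 'n', 'g', ' ', 's',
  'e', 'n', 't', ' ', 'b', 'u', 'i', 'l', 'd', ' ', 'b', 'u', 'i', 'l', 'd', 's', ' ', 'b', 'u', 'i', 'l', 'd', 'i', 'n',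
  'g', ' ', 'b', 'u', 'i', 'l', 't', ' ', 'u', 'n', 'd', 'e', 'r', 's', 't', 'a', 'n', 'd', ' ', 'u', 'n', 'd', 'e', 'r',
  's', 't', 'a', 'n', 'd', 's', ' ', 'u', 'n', 'd', 'e', 'r', 's', 't', 'a', 'n', 'd', 'i', 'n', 'g', ' ', 'u', 'n', 'd',
  'e', 'r', 's', 't', 'o', 'o', 'd', ' ', 'd', 'r', 'a', 'w', ' ', 'd', 'r', 'a', 'w', 's', ' ', 'd', 'r', 'a', 'w', 'i',
  'n', 'g', ' ', 'd', 'r', 'e', 'w', ' ', 'd', 'r', 'a', 'w', 'n', ' ', 'b', 'r', 'e', 'a', 'k', ' ', 'b', 'r', 'e', 'a',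
  'k', 's', ' ', 'b', 'r', 'e', 'a', 'k', 'i', 'n', 'g', ' ', 'b', 'r', 'o', 'k', 'e', ' ', 'b', 'r', 'o', 'k', 'e', 'n',
  ' ', 's', 'p', 'e', 'n', 'd', ' ', 's', 'p', 'e', 'n', 'd', 's', ' ', 's', 'p', 'e', 'n', 'd', 'i', 'n', 'g', ' ', 's',
  'p', 'e', 'n', 't', ' ', 'c', 'u', 't', ' ', 'c', 'u', 't', 's', ' ', 'c', 'u', 't', 't', 'i', 'n', 'g', ' ', 'r', 'i',
  's', 'e', ' ', 'r', 'i', 's', 'e', 's', ' ', 'r', 'i', 's', 'i', 'n', 'g', ' ', 'r', 'o', 's', 'e', ' ', 'r', 'i', 's',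
  'e', 'n', ' ', 'd', 'r', 'i', 'v', 'e', ' ', 'd', 'r', 'i', 'v', 'e', 's', ' ', 'd', 'r', 'i', 'v', 'i', 'n', 'g', ' ',
  'd', 'r', 'o', 'v', 'e', ' ', 'd', 'r', 'i', 'v', 'e', 'n', ' ', 'b', 'u', 'y', ' ', 'b', 'u', 'y', 's', ' ', 'b', 'u',
  'y', 'i', 'n', 'g', ' ', 'b', 'o', 'u', 'g', 'h', 't', ' ', 'w', 'e', 'a', 'r', ' ', 'w', 'e', 'a', 'r', 's', ' ', 'w',
  'e', 'a', 'r', 'i', 'n', 'g', ' ', 'w', 'o', 'r', 'e', ' ', 'w', 'o', 'r', 'n', ' ', 'c', 'h', 'o', 'o', 's', 'e', ' ',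
  'c', 'h', 'o', 'o', 's', 'e', 's', ' ', 'c', 'h', 'o', 'o', 's', 'i', 'n', 'g', ' ', 'c', 'h', 'o', 's', 'e', ' ', 'c',
  'h', 'o', 's', 'e', 'n', ' ', 's', 'e', 'e', 'k', ' ', 's', 'e', 'e', 'k', 's', ' ', 's', 'e', 'e', 'k', 'i', 'n', 'g',
  ' ', 's', 'o', 'u', 'g', 'h', 't']

-- code points of the Source B literal backing SUFFIX_SET
def BIG_SUFFIX : List Char := [
  'g', 'a', 'v', 'e', ' ', 't', 'o', 'l', 'd', ' ', 'm', 'a', 'd', 'e', ' ', 'h', 'e', 'l', 'd', ' ', 's', 'a', 'i', 'd',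
  ' ', 'c', 'l', 'a', 'i', 'm', 'e', 'd', ' ', 'c', 'o', 'n', 'f', 'i', 'r', 'm', 'e', 'd', ' ', 'a', 'r', 'g', 'u', 'e',
  'd', ' ', 'o', 'r', 'd', 'e', 'r', 'e', 'd', ' ', 'd', 'e', 'm', 'a', 'n', 'd', 'e', 'd', ' ', 'a', 'n', 'n', 'o', 'u',
  'n', 'c', 'e', 'd', ' ', 'r', 'e', 'v', 'e', 'a', 'l', 'e', 'd', ' ', 'p', 'r', 'o', 'v', 'i', 'd', 'e', 'd', ' ', 'e',
  'x', 'p', 'l', 'a', 'i', 'n', 'e', 'd', ' ', 'a', 'd', 'd', 'e', 'd', ' ', 'c', 'o', 'n', 't', 'i', 'n', 'u', 'e', 'd',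
  ' ', 'i', 'n', 's', 'i', 's', 't', 'e', 'd', ' ', 'p', 'r', 'o', 'p', 'o', 's', 'e', 'd', ' ', 'a', 'g', 'r', 'e', 'e',
  'd', ' ', 'd', 'e', 'c', 'l', 'a', 'r', 'e', 'd', ' ', 's', 't', 'a', 't', 'e', 'd', ' ', 'c', 'o', 'm', 'm', 'e', 'n',
  't', 'e', 'd', ' ', 'w', 'a', 'r', 'n', 'e', 'd', ' ', 'a', 'd', 'v', 'i', 's', 'e', 'd', ' ', 'n', 'o', 't', 'e', 'd',
  ' ', 'r', 'e', 'm', 'a', 'r', 'k', 'e', 'd', ' ', 'c', 'o', 'n', 'c', 'l', 'u', 'd', 'e', 'd', ' ', 'r', 'e', 's', 'p',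
  'o', 'n', 'd', 'e', 'd', ' ', 'r', 'e', 'p', 'l', 'i', 'e', 'd', ' ', 'a', 's', 'k', 'e', 'd', ' ', 'q', 'u', 'e', 's',
  't', 'i', 'o', 'n', 'e', 'd', ' ', 's', 'u', 'g', 'g', 'e', 's', 't', 'e', 'd', ' ', 'e', 'm', 'p', 'h', 'a', 's', 'i',
  's', 'e', 'd', ' ', 'a', 'c', 'k', 'n', 'o', 'w', 'l', 'e', 'd', 'g', 'e', 'd', ' ', 'd', 'i', 's', 'm', 'i', 's', 's',
  'e', 'd', ' ', 'c', 'r', 'i', 't', 'i', 'c', 'i', 's', 'e', 'd', ' ', 'p', 'r', 'a', 'i', 's', 'e', 'd', ' ', 'c', 'o',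
  'n', 'd', 'e', 'm', 'n', 'e', 'd', ' ', 'w', 'e', 'l', 'c', 'o', 'm', 'e', 'd', ' ', 'r', 'e', 'j', 'e', 'c', 't', 'e',
  'd', ' ', 'a', 'c', 'c', 'e', 'p', 't', 'e', 'd', ' ', 'p', 'r', 'o', 'm', 'i', 's', 'e', 'd', ' ', 't', 'h', 'r', 'e',
  'a', 't', 'e', 'n', 'e', 'd', ' ', 'o', 'f', 'f', 'e', 'r', 'e', 'd', ' ', 'i', 'n', 'v', 'i', 't', 'e', 'd', ' ', 'u',
  'r', 'g', 'e', 'd', ' ', 'c', 'a', 'l', 'l', 'e', 'd', ' ', 'd', 'e', 's', 'c', 'r', 'i', 'b', 'e', 'd', ' ', 'r', 'e',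
  'f', 'e', 'r', 'r', 'e', 'd', ' ', 'c', 'o', 'n', 's', 'i', 'd', 'e', 'r', 'e', 'd', ' ', 'b', 'e', 'l', 'i', 'e', 'v',
  'e', 'd', ' ', 'e', 'x', 'p', 'e', 'c', 't', 'e', 'd', ' ', 'h', 'o', 'p', 'e', 'd', ' ', 'f', 'e', 'a', 'r', 'e', 'd',
  ' ', 'r', 'e', 'p', 'o', 'r', 't', 'e', 'd', ' ', 'a', 's', 's', 'e', 'r', 't', 'e', 'd', ' ', 'm', 'a', 'i', 'n', 't',
  'a', 'i', 'n', 'e', 'd', ' ', 'c', 'o', 'n', 't', 'e', 'n', 'd', 'e', 'd', ' ', 'o', 'b', 's', 'e', 'r', 'v', 'e', 'd',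
  ' ', 'r', 'e', 'c', 'a', 'l', 'l', 'e', 'd', ' ', 'r', 'e', 'm', 'e', 'm', 'b', 'e', 'r', 'e', 'd', ' ', 'a', 'd', 'm',
  'i', 't', 't', 'e', 'd', ' ', 'd', 'e', 'n', 'i', 'e', 'd', ' ', 'r', 'e', 'c', 'o', 'g', 'n', 'i', 's', 'e', 'd', ' ',
  'u', 'n', 'd', 'e', 'r', 's', 't', 'o', 'o', 'd', ' ', 'k', 'n', 'e', 'w', ' ', 'l', 'e', 'a', 'r', 'n', 'e', 'd', ' ',
  'd', 'i', 's', 'c', 'o', 'v', 'e', 'r', 'e', 'd', ' ', 'f', 'o', 'u', 'n', 'd', ' ', 's', 'h', 'o', 'w', 'e', 'd', ' ',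
  'd', 'e', 'm', 'o', 'n', 's', 't', 'r', 'a', 't', 'e', 'd', ' ', 'p', 'r', 'o', 'v', 'e', 'd', ' ', 'i', 'n', 'd', 'i',
  'c', 'a', 't', 'e', 'd', ' ', 'i', 'm', 'p', 'l', 'i', 'e', 'd', ' ', 's', 'u', 'm', 'm', 'a', 'r', 'i', 's', 'e', 'd',
  ' ', 'o', 'u', 't', 'l', 'i', 'n', 'e', 'd', ' ', 'd', 'e', 't', 'a', 'i', 'l', 'e', 'd', ' ', 'l', 'i', 's', 't', 'e',
  'd']

-- code points of the Source B literal backing PREFIX_WORDS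
def BIG_PREFIX : List Char := [
  'w', 'i', 't', 'h', ' ', 'b', 'u', 't', ' ', 'a', 'n', 'd', ' ', 'f', 'o', 'r', ' ', 'f', 'r', 'o', 'm', ' ', 't', 'h',
  'a', 't', ' ', 't', 'h', 'i', 's', ' ', 't', 'h', 'e', 's', 'e', ' ', 't', 'h', 'o', 's', 'e', ' ', 'w', 'h', 'e', 'n',
  ' ', 'w', 'h', 'e', 'r', 'e', ' ', 'w', 'h', 'a', 't', ' ', 'w', 'h', 'o', ' ', 'w', 'h', 'y', ' ', 'h', 'o', 'w', ' ',
  'w', 'h', 'i', 'c', 'h', ' ', 'w', 'h', 'o', 's', 'e', ' ', 'w', 'h', 'o', 'm', ' ', 't', 'h', 'e', ' ', 'a', ' ', 'a',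
  'n', ' ', 'a', 's', ' ', 'b', 'y', ' ', 'o', 'n', ' ', 'i', 'n', ' ', 'a', 't', ' ', 't', 'o', ' ', 'o', 'f', ' ', 'o',
  'f', 'f', ' ', 'u', 'p', ' ', 'o', 'u', 't', ' ', 'd', 'o', 'w', 'n', ' ', 'o', 'v', 'e', 'r', ' ', 'u', 'n', 'd', 'e',
  'r', ' ', 't', 'h', 'r', 'o', 'u', 'g', 'h', ' ', 'd', 'u', 'r', 'i', 'n', 'g', ' ', 'b', 'e', 'f', 'o', 'r', 'e', ' ',
  'a', 'f', 't', 'e', 'r', ' ', 'a', 'b', 'o', 'v', 'e', ' ', 'b', 'e', 'l', 'o', 'w', ' ', 'b', 'e', 't', 'w', 'e', 'e',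
  'n', ' ', 'a', 'm', 'o', 'n', 'g', ' ', 'w', 'i', 't', 'h', 'i', 'n', ' ', 'w', 'i', 't', 'h', 'o', 'u', 't', ' ', 'a',
  'g', 'a', 'i', 'n', 's', 't', ' ', 't', 'o', 'w', 'a', 'r', 'd', ' ', 't', 'o', 'w', 'a', 'r', 'd', 's', ' ', 'a', 'c',
  'r', 'o', 's', 's', ' ', 'a', 'r', 'o', 'u', 'n', 'd', ' ', 'b', 'e', 'h', 'i', 'n', 'd', ' ', 'b', 'e', 'y', 'o', 'n',
  'd', ' ', 'e', 'x', 'c', 'e', 'p', 't', ' ', 'i', 'n', 's', 'i', 'd', 'e', ' ', 'i', 'n', 't', 'o', ' ', 'n', 'e', 'a',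
  'r', ' ', 'o', 'n', 't', 'o', ' ', 'o', 'u', 't', 's', 'i', 'd', 'e', ' ', 'u', 'p', 'o', 'n', ' ', 'v', 'i', 'a', ' ',
  'w', 'o', 'r', 't', 'h']

-- code points of the Source B literal backing FRAGMENTS
def BIG_FRAG : List Char := [
  't', 'h', 'e', '-', 'f', 'o', 'l', 'l', 'o', 'w', 'i', 'n', 'g', ' ', 'f', 'o', 'l', 'l', 'o', 'w', 'i', 'n', 'g', '-',
  't', 'h', 'e', ' ', 'n', 'e', 'w', 's', '-', 'i', 's', ' ', 'i', 's', '-', 'c', 'o', 'm', 'i', 'n', 'g', ' ', 'r', 'e',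
  'p', 'o', 'r', 't', 's', '-', 'f', 'r', 'o', 'm', ' ', 's', 'o', 'u', 'r', 'c', 'e', 's', '-', 'c', 'l', 'o', 's', 'e',
  ' ', 'c', 'l', 'o', 's', 'e', '-', 't', 'o', ' ', 'a', 'c', 'c', 'o', 'r', 'd', 'i', 'n', 'g', '-', 't', 'o', ' ', 's',
  'p', 'o', 'k', 'e', 's', 'p', 'e', 'r', 's', 'o', 'n', '-', 'f', 'o', 'r', ' ', 'r', 'e', 'p', 'r', 'e', 's', 'e', 'n',
  't', 'a', 't', 'i', 'v', 'e', '-', 'o', 'f', ' ', 'o', 'f', 'f', 'i', 'c', 'i', 'a', 'l', 's', '-', 'i', 'n', ' ', 'a',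
  'u', 't', 'h', 'o', 'r', 'i', 't', 'i', 'e', 's', '-', 'i', 'n', ' ', 'f', 'o', 'r', 'c', 'e', 's', '-', 'i', 'n', ' ',
  'f', 'l', 'e', 'e', 't', '-', 'i', 'n', ' ', 's', 't', 'a', 't', 'i', 'o', 'n', '-', 'i', 'n', ' ', 's', 'y', 's', 't',
  'e', 'm', '-', 'i', 'n']

def B_EXACT : PySem.Set (List Char) := PySem.Set.ofList (wordsC BIG_EXACT [])
def SUFFIX_SET : PySem.Set (List Char) := PySem.Set.ofList (wordsC BIG_SUFFIX [])
def PREFIX_WORDS : PySem.Set (List Char) := PySem.Set.ofList (wordsC BIG_PREFIX [])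
def B_FRAGMENTS : List (List Char) := wordsC BIG_FRAG []

-- exact hand port of eid.rsplit('-', 1)[-1]: the text after the last '-', the whole string if no '-'
def lastTokC (cs : List Char) : List Char := (cs.reverse.takeWhile (fun c => c != '-')).reverse

-- exact hand port of eid.split('-', 1)[0]: the text before the first '-', the whole string if no '-'
def firstTokC (cs : List Char) : List Char := cs.takeWhile (fun c => c != '-')

def is_garbage_alt (entity_id : String) : Bool :=
  let eid := PySem.Chars.strip (PySem.Chars.lower entity_id.toList)
  if PySem.Set.contains B_EXACT eid then true
  else if PySem.Set.contains SUFFIX_SET (lastTokC eid) then true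
  else if PySem.Chars.isIn ['-'] eid && PySem.Set.contains PREFIX_WORDS (firstTokC eid) then true
  else B_FRAGMENTS.any (fun frag => PySem.Chars.isIn frag eid)

-- ===== PRECONDITION & SPEC =====
def Spec_is_garbage (entity_id : String) (out : Bool) : Prop := out = is_garbage_alt entity_id
instance (entity_id : String) (out : Bool) : Decidable (Spec_is_garbage entity_id out) := by unfold Spec_is_garbage; infer_instance

-- ===== CLAIM (what is proved, stated in full; the proofs are below) =====
def Claim_equal_is_garbage : Prop := ∀ (entity_id : String), Dom_is_garbage entity_id → Spec_is_garbage entity_id (is_garbage entity_id)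

-- ===== LEMMAS AND PROOFS =====

-- the three decided table facts: B's split word lists ARE A's word lists, code-point-wise
theorem exact_words : wordsC BIG_EXACT [] = ([
  "the", "with", "but", "and", "for", "from", "that", "this", "these", "those", "when", "where",
  "what", "who", "why", "how", "which", "whose", "whom", "its", "it", "he", "she", "they", "them",
  "their", "his", "her", "him", "we", "us", "our", "you", "your", "i", "me", "my", "mine", "a",
  "an", "all", "any", "both", "each", "either", "neither", "none", "some", "many", "much", "more",
  "most", "other", "another", "such", "no", "not", "only", "own", "same", "so", "than", "too",
  "very", "one", "two", "three", "four", "five", "six", "seven", "eight", "nine", "ten", "can",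
  "will", "shall", "may", "might", "must", "should", "would", "could", "do", "does", "did",
  "done", "doing", "have", "has", "had", "having", "be", "been", "being", "am", "is", "are",
  "was", "were", "go", "goes", "going", "went", "gone", "get", "gets", "getting", "got", "gotten",
  "take", "takes", "taking", "took", "taken", "come", "comes", "coming", "came", "see", "sees",
  "seeing", "saw", "seen", "know", "knows", "knowing", "knew", "known", "think", "thinks",
  "thinking", "thought", "use", "uses", "using", "used", "find", "finds", "finding", "found",
  "give", "gives", "giving", "given", "tell", "tells", "telling", "told", "become", "becomes",
  "becoming", "became", "leave", "leaves", "leaving", "left", "feel", "feels", "feeling", "felt",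
  "put", "puts", "putting", "bring", "brings", "bringing", "brought", "begin", "begins",
  "beginning", "began", "begun", "keep", "keeps", "keeping", "kept", "hold", "holds", "holding",
  "write", "writes", "writing", "wrote", "written", "stand", "stands", "standing", "stood",
  "hear", "hears", "hearing", "heard", "let", "lets", "letting", "mean", "means", "meaning",
  "meant", "set", "sets", "setting", "meet", "meets", "meeting", "met", "run", "runs", "running",
  "ran", "pay", "pays", "paying", "paid", "sit", "sits", "sitting", "sat", "speak", "speaks",
  "speaking", "spoke", "spoken", "lie", "lies", "lying", "lay", "lain", "lead", "leads",
  "leading", "led", "read", "reads", "reading", "grow", "grows", "growing", "grew", "grown",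
  "lose", "loses", "losing", "lost", "fall", "falls", "falling", "fell", "fallen", "send",
  "sends", "sending", "sent", "build", "builds", "building", "built", "understand", "understands",
  "understanding", "understood", "draw", "draws", "drawing", "drew", "drawn", "break", "breaks",
  "breaking", "broke", "broken", "spend", "spends", "spending", "spent", "cut", "cuts", "cutting",
  "rise", "rises", "rising", "rose", "risen", "drive", "drives", "driving", "drove", "driven",
  "buy", "buys", "buying", "bought", "wear", "wears", "wearing", "wore", "worn", "choose",
  "chooses", "choosing", "chose", "chosen", "seek", "seeks", "seeking", "sought"] : List String).map String.toList := by decide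

theorem suffix_words : wordsC BIG_SUFFIX [] = GARBAGE_SUFFIXES.map String.toList := by decide

theorem prefix_words : A_PREFIXES.map String.toList = (wordsC BIG_PREFIX []).map (fun w => w ++ ['-']) := by decide

theorem frag_words : A_FRAGMENTS.map String.toList = B_FRAGMENTS := by decide

theorem suffix_no_dash : ∀ w ∈ wordsC BIG_SUFFIX [], '-' ∉ w := by decide

theorem prefix_no_dash : ∀ w ∈ wordsC BIG_PREFIX [], '-' ∉ w := by decide

theorem any_congr_mem {α : Type} {p q : α → Bool} :
    ∀ {L : List α}, (∀ x ∈ L, p x = q x) → L.any p = L.any q := by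
  intro L h
  induction L with
  | nil => rfl
  | cons a t ih => simp_all

theorem contains_ofList_eq_any {α : Type} [BEq α] [LawfulBEq α] (L : List α) (t : α) :
    PySem.Set.contains (PySem.Set.ofList L) t = L.any (fun s => t == s) := by
  rw [Bool.eq_iff_iff]
  rw [show PySem.Set.contains (PySem.Set.ofList L) t = List.elem t (PySem.Set.ofList L) from rfl]
  rw [List.elem_iff, PySem.Set.mem_ofList]
  simp only [List.any_eq_true, beq_iff_eq]
  exact ⟨fun h => ⟨t, h, rfl⟩, fun ⟨s, hs, he⟩ => he ▸ hs⟩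

-- membership in a set of Strings equals membership of the code points in the mapped set
theorem contains_map_toList (L : List String) (t : String) :
    PySem.Set.contains (PySem.Set.ofList (L.map String.toList)) t.toList
      = PySem.Set.contains (PySem.Set.ofList L) t := by
  rw [contains_ofList_eq_any, contains_ofList_eq_any, List.any_map]
  refine any_congr_mem (fun s _ => ?_)
  simp [Function.comp, String.ext_iff]

theorem takeWhile_no_dash {w : List Char} (hw : '-' ∉ w) :
    w.takeWhile (fun c => c != '-') = w := by
  refine List.takeWhile_eq_self_iff.mpr ?_
  intro x hx
  simp only [bne_iff_ne, ne_eq]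
  rintro rfl; exact hw hx

theorem takeWhile_before_dash {w r : List Char} (hw : '-' ∉ w) :
    (w ++ '-' :: r).takeWhile (fun c => c != '-') = w := by
  rw [List.takeWhile_append, takeWhile_no_dash hw]
  simp

theorem lastTok_eq_iff (cs w : List Char) (hw : '-' ∉ w) :
    ((cs.reverse.takeWhile (fun c => c != '-')).reverse = w) ↔ (('-' :: w) <:+ cs ∨ cs = w) := by
  constructor
  · intro h
    have hsplit : cs.reverse.takeWhile (fun c => c != '-') ++
        cs.reverse.dropWhile (fun c => c != '-') = cs.reverse :=
      List.takeWhile_append_dropWhile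
    rcases hd : cs.reverse.dropWhile (fun c => c != '-') with _ | ⟨c, d'⟩
    · right
      rw [hd, List.append_nil] at hsplit
      rw [hsplit] at h
      simpa using h
    · left
      have hne : cs.reverse.dropWhile (fun c => c != '-') ≠ [] := by simp [hd]
      have hc : c = '-' := by
        have hnot := List.head_dropWhile_not (fun c => c != '-') hne
        have hh : (cs.reverse.dropWhile (fun c => c != '-')).head? = some c := by rw [hd]; rfl
        rw [List.head?_eq_some_head hne] at hh
        rw [Option.some.inj hh] at hnot
        simpa using hnot
      refine ⟨d'.reverse, ?_⟩
      have : cs = (cs.reverse.takeWhile (fun c => c != '-') ++ (c :: d')).reverse := by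
        rw [← hd, hsplit, List.reverse_reverse]
      rw [this, List.reverse_append, List.reverse_cons, h, hc]
      simp
  · rintro (⟨t, rfl⟩ | rfl)
    · rw [show (t ++ '-' :: w).reverse = w.reverse ++ '-' :: t.reverse by simp,
        takeWhile_before_dash (by simpa using hw), List.reverse_reverse]
    · rw [takeWhile_no_dash (by simpa using hw), List.reverse_reverse]

theorem firstTok_iff (cs w : List Char) (hw : '-' ∉ w) :
    ((w ++ ['-']) <+: cs) ↔ ('-' ∈ cs ∧ cs.takeWhile (fun c => c != '-') = w) := by
  constructor
  · rintro ⟨r, rfl⟩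
    constructor
    · simp
    · rw [show w ++ ['-'] ++ r = w ++ '-' :: r by simp]
      exact takeWhile_before_dash hw
  · rintro ⟨hm, ht⟩
    have hsplit : cs.takeWhile (fun c => c != '-') ++
        cs.dropWhile (fun c => c != '-') = cs := List.takeWhile_append_dropWhile
    rcases hd : cs.dropWhile (fun c => c != '-') with _ | ⟨c, d'⟩
    · exfalso
      rw [hd, List.append_nil] at hsplit
      rw [ht] at hsplit
      exact hw (hsplit ▸ hm)
    · have hne : cs.dropWhile (fun c => c != '-') ≠ [] := by simp [hd]
      have hc : c = '-' := by
        have hnot := List.head_dropWhile_not (fun c => c != '-') hne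
        have hh : (cs.dropWhile (fun c => c != '-')).head? = some c := by rw [hd]; rfl
        rw [List.head?_eq_some_head hne] at hh
        rw [Option.some.inj hh] at hnot
        simpa using hnot
      refine ⟨d', ?_⟩
      rw [← hsplit, ht, hd, hc]
      simp

theorem dash_append_toList (s : String) : ("-" ++ s).toList = '-' :: s.toList := by
  rw [String.toList_append]
  have : ("-" : String).toList = ['-'] := by decide
  rw [this]; rfl

theorem suffix_point (eid s : String) (hs : '-' ∉ s.toList) :
    (PySem.Str.endswith eid ("-" ++ s) || eid == s) = (lastTokC eid.toList == s.toList) := by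
  rw [Bool.eq_iff_iff]
  simp only [Bool.or_eq_true, PySem.Str.endswith_eq, PySem.Chars.endswith_iff,
    beq_iff_eq, dash_append_toList, String.ext_iff, lastTokC]
  exact (lastTok_eq_iff eid.toList s.toList hs).symm

theorem singleton_dash_isIn (cs : List Char) :
    PySem.Chars.isIn ['-'] cs = true ↔ '-' ∈ cs := by
  rw [PySem.Chars.isIn_iff_infix, List.singleton_infix_iff]

theorem prefix_point (cs w : List Char) (hw : '-' ∉ w) :
    PySem.Chars.startswith cs (w ++ ['-']) =
      (PySem.Chars.isIn ['-'] cs && (firstTokC cs == w)) := by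
  rw [Bool.eq_iff_iff]
  simp only [Bool.and_eq_true, PySem.Chars.startswith_iff, beq_iff_eq, firstTokC,
    singleton_dash_isIn]
  exact firstTok_iff cs w hw

theorem suffix_any (eid : String) :
    (GARBAGE_SUFFIXES.any fun s => PySem.Str.endswith eid ("-" ++ s) || eid == s)
      = PySem.Set.contains SUFFIX_SET (lastTokC eid.toList) := by
  have hdash : ∀ s ∈ GARBAGE_SUFFIXES, '-' ∉ s.toList := by
    intro s hs
    have := suffix_no_dash s.toList (by rw [suffix_words]; exact List.mem_map_of_mem hs)
    exact this
  rw [show SUFFIX_SET = PySem.Set.ofList (wordsC BIG_SUFFIX []) from rfl, suffix_words,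
    contains_ofList_eq_any, List.any_map]
  refine any_congr_mem (fun s hsm => ?_)
  simpa [Function.comp] using suffix_point eid s (hdash s hsm)

theorem prefix_any (eid : String) :
    (A_PREFIXES.any fun p => PySem.Str.startswith eid p)
      = (PySem.Chars.isIn ['-'] eid.toList && PySem.Set.contains PREFIX_WORDS (firstTokC eid.toList)) := by
  have h1 : (A_PREFIXES.any fun p => PySem.Str.startswith eid p)
      = (A_PREFIXES.map String.toList).any (fun pc => PySem.Chars.startswith eid.toList pc) := by
    rw [List.any_map]
    exact any_congr_mem (fun p _ => by simp [Function.comp])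
  rw [h1, prefix_words, List.any_map]
  rw [any_congr_mem (fun w hwm => by
    simpa [Function.comp] using prefix_point eid.toList w (prefix_no_dash w hwm))]
  rw [show PREFIX_WORDS = PySem.Set.ofList (wordsC BIG_PREFIX []) from rfl, contains_ofList_eq_any]
  cases h : PySem.Chars.isIn ['-'] eid.toList <;> simp

theorem frag_any (eid : String) :
    (A_FRAGMENTS.any fun frag => PySem.Str.isIn frag eid)
      = B_FRAGMENTS.any (fun frag => PySem.Chars.isIn frag eid.toList) := by
  rw [← frag_words, List.any_map]
  exact any_congr_mem (fun f _ => by simp [Function.comp])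

theorem exact_contains (eid : String) :
    PySem.Set.contains GARBAGE_EXACT eid = PySem.Set.contains B_EXACT eid.toList := by
  rw [show B_EXACT = PySem.Set.ofList (wordsC BIG_EXACT []) from rfl, exact_words,
    contains_map_toList]
  rfl

theorem strip_lower_toList (s : String) :
    (PySem.Str.strip (PySem.Str.lower s)).toList
      = PySem.Chars.strip (PySem.Chars.lower s.toList) := by
  simp [PySem.Str.toList_strip, PySem.Str.toList_lower]

theorem ports_agree (entity_id : String) : is_garbage entity_id = is_garbage_alt entity_id := by
  unfold is_garbage is_garbage_alt
  simp only [← strip_lower_toList entity_id]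
  rw [exact_contains, suffix_any, prefix_any, frag_any]
  split_ifs <;> simp_all

-- ===== VERDICT (by name: the statement is the Claim_ definition above) =====
theorem is_garbage_spec : Claim_equal_is_garbage := by
  intro entity_id _
  exact ports_agree entity_id
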